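-- pv_equiv track=rewrite | github.com/lim-it-err/backjoon-as-oop | 프로그래머스/lv3/60059. 자물쇠와 열쇠/자물쇠와 열쇠.py | solution
-- ===== SOURCE A (Python) =====
-- def rot(key):
--     def rot90(key):
--         return [[key[j][i] for j in range(len(key))] for i in range(len(key[0])-1,-1,-1)]
--     return [rot90(key),rot90(rot90(key)), rot90(rot90(rot90(key))), rot90(rot90(rot90(rot90(key))))]
--
-- def solution(key, lock):
--     keys = rot(key)
--     N, M = len(key), len(lock)
--     for rotated_key in keys:
--         for x in range(-(N - 1), M):
--             for y in range(-(N - 1), M):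
--                 temp_lock = [row[:] for row in lock]
--                 is_valid = True
--
--                 try:
--                     for i in range(N):
--                         for j in range(N):
--                             if 0 <= i + x < M and 0 <= j + y < M:
--                                 temp_lock[i + x][j + y] += rotated_key[i][j]
--
--                     for row in temp_lock:
--                         if 0 in row:
--                             is_valid = False
--                             break
--                         if 2 in row:
--                             is_valid = False
--                             break
--                     if is_valid:
--                         return True
--
--                 except IndexError:
--                     pass
--
--     return False
-- ===== SOURCE B (Python) =====
-- def solution(key, lock):
--     n, m = len(key), len(lock)
--     # cells of the lock that are already invalid (value 0 or 2) and must be overlapped and fixed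
--     bad = [(u, v) for u in range(m) for v in range(m) if lock[u][v] in (0, 2)]
--
--     def kval(r, i, j):
--         # value of key rotated r quarter-turns, by index arithmetic
--         if r == 0:
--             return key[i][j]
--         if r == 1:
--             return key[j][n - 1 - i]
--         if r == 2:
--             return key[n - 1 - i][n - 1 - j]
--         return key[n - 1 - j][i]
--
--     def ok(r, x, y):
--         # every bad cell must lie inside the key window
--         for (u, v) in bad:
--             if not (x <= u < x + n and y <= v < y + n):
--                 return False
--         # scan only the window: no overlapped cell may end up 0 or 2
--         for i in range(n):
--             u = i + x
--             if 0 <= u < m: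
--                 for j in range(n):
--                     v = j + y
--                     if 0 <= v < m and lock[u][v] + kval(r, i, j) in (0, 2):
--                         return False
--         return True
--
--     if bad:
--         # anchor the window on the first bad cell: it prunes the shifts to at most n*n
--         u0, v0 = bad[0]
--         xs = range(u0 - n + 1, u0 + 1)
--         ys = range(v0 - n + 1, v0 + 1)
--     else:
--         xs = range(-(n - 1), m)
--         ys = range(-(n - 1), m)
--     return any(ok(r, x, y) for r in range(4) for x in xs for y in ys)
-- ===== Notes on version B (the rewrite author's own statement) =====
-- stated objective: faster
-- what changed: Instead of trying every shift and, per shift, copying the whole lock board, adding a materialized rotation into it and rescanning it for 0/2, B precomputes the list of already-invalid lock cells (value 0 or 2), anchors the candidate shifts on the first such cell (at most n^2 shifts instead of (n+m-1)^2 when any exists), and per shift checks only that all invalid cells fall in the key window and scans the n^2 window cells with rotation done by index arithmetic.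
-- outside the precondition, e.g. on solution([[0, 1]], [[1, 0]]): A returns False, B returns True; on solution([[1]], [[0, 0], [0]]): A returns False, B raises IndexError
import Mathlib
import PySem

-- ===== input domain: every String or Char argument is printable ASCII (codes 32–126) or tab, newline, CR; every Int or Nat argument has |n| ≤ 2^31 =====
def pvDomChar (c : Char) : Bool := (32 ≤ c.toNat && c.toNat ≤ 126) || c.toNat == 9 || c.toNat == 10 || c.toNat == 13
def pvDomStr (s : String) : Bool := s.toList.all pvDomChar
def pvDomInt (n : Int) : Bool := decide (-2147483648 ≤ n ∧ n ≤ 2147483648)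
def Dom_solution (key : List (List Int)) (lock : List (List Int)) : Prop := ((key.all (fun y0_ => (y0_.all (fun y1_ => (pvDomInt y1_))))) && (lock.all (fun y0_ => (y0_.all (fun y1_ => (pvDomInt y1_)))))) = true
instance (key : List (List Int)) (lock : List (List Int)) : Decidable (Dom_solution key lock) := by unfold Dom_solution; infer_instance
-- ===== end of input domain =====

-- B replaces A's try-every-shift / copy-the-board / rescan strategy by a precomputed list of the
-- lock's already-invalid cells (value 0 or 2), anchoring the candidate shifts on the first such
-- cell (at most n*n shifts instead of (n+m-1)^2) and scanning only the n*n key window per shift.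

-- ===== PORT A =====
-- xs[i] ported as the total pyGetD; exact on Pre_solution (square inputs: every index Python
-- evaluates is in range, and the try/except IndexError in A never fires there).
def pvGet (xs : List (List Int)) (i : Int) : List Int := PySem.List.pyGetD xs i []
def pvGetI (xs : List Int) (i : Int) : Int := PySem.List.pyGetD xs i 0

def rot90 (key : List (List Int)) : List (List Int) :=
  (PySem.List.pyRange (((pvGet key 0).length : Int) - 1) (-1) (-1)).map (fun i =>
    (PySem.List.pyRange 0 (key.length : Int) 1).map (fun j => pvGetI (pvGet key j) i))

def rotAll (key : List (List Int)) : List (List (List Int)) :=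
  [rot90 key, rot90 (rot90 key), rot90 (rot90 (rot90 key)), rot90 (rot90 (rot90 (rot90 key)))]

-- one (x, y) shift of A's loop body: build temp_lock (the copy row[:] is pure, so temp starts
-- as lock itself), add the rotated key, then scan for a 0 or a 2
def checkShift (lock rk : List (List Int)) (N M x y : Int) : Bool :=
  let temp := (PySem.List.pyRange 0 N 1).foldl (fun tl i =>
    (PySem.List.pyRange 0 N 1).foldl (fun tl j =>
      if 0 ≤ i + x ∧ i + x < M ∧ 0 ≤ j + y ∧ j + y < M then
        PySem.List.pySetD tl (i + x)
          (PySem.List.pySetD (pvGet tl (i + x)) (j + y)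
            (pvGetI (pvGet tl (i + x)) (j + y) + pvGetI (pvGet rk i) j))
      else tl) tl) lock
  temp.all (fun row => !(row.contains 0) && !(row.contains 2))

def solution (key : List (List Int)) (lock : List (List Int)) : Bool :=
  let keys := rotAll key
  let N : Int := (key.length : Int)
  let M : Int := (lock.length : Int)
  keys.any (fun rk =>
    (PySem.List.pyRange (-(N - 1)) M 1).any (fun x =>
      (PySem.List.pyRange (-(N - 1)) M 1).any (fun y =>
        checkShift lock rk N M x y)))

-- ===== PORT B =====
-- value of key rotated r quarter-turns, by index arithmetic; getD is exact on Pre_solution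
-- (indices in range)
def kval (key : List (List Int)) (n r i j : Nat) : Int :=
  if r = 0 then (key.getD i []).getD j 0
  else if r = 1 then (key.getD j []).getD (n - 1 - i) 0
  else if r = 2 then (key.getD (n - 1 - i) []).getD (n - 1 - j) 0
  else (key.getD (n - 1 - j) []).getD i 0

-- the comprehension building Source B's `bad` list
def badCells (lock : List (List Int)) (m : Nat) : List (Nat × Nat) :=
  (List.range m).flatMap (fun u => (List.range m).filterMap (fun v =>
    if (lock.getD u []).getD v 0 = 0 ∨ (lock.getD u []).getD v 0 = 2 then some (u, v) else none))

-- Source B's `ok`: bad cells inside the window, then the window scan (early returns become all/&&)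
def okShift (key lock : List (List Int)) (n m : Nat) (bad : List (Nat × Nat)) (r : Nat)
    (x y : Int) : Bool :=
  (bad.all fun p =>
    decide (x ≤ (p.1 : Int) ∧ (p.1 : Int) < x + n ∧ y ≤ (p.2 : Int) ∧ (p.2 : Int) < y + n)) &&
  ((List.range n).all fun i =>
    let u : Int := (i : Int) + x
    if 0 ≤ u ∧ u < (m : Int) then
      (List.range n).all fun j =>
        let v : Int := (j : Int) + y
        !(decide (0 ≤ v ∧ v < (m : Int) ∧
            ((lock.getD u.toNat []).getD v.toNat 0 + kval key n r i j = 0 ∨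
             (lock.getD u.toNat []).getD v.toNat 0 + kval key n r i j = 2)))
    else true)

def solution_alt (key : List (List Int)) (lock : List (List Int)) : Bool :=
  let n := key.length
  let m := lock.length
  let bad := badCells lock m
  let ranges : List Int × List Int :=
    match bad with
    | (u0, v0) :: _ =>
        (PySem.List.pyRange ((u0 : Int) - n + 1) ((u0 : Int) + 1) 1,
         PySem.List.pyRange ((v0 : Int) - n + 1) ((v0 : Int) + 1) 1)
    | [] =>
        (PySem.List.pyRange (-((n : Int) - 1)) (m : Int) 1,
         PySem.List.pyRange (-((n : Int) - 1)) (m : Int) 1)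
  (List.range 4).any fun r =>
    ranges.1.any fun x => ranges.2.any fun y => okShift key lock n m bad r x y

-- ===== PRECONDITION & SPEC =====
-- Pre_ restricts to the problem's natural domain: key a nonempty square matrix and lock a
-- square matrix. Outside it A raises IndexError (empty or too-short key rows) or returns a
-- value produced by its accidental catch-and-skip of IndexError on ragged/non-square input.
def Pre_solution (key : List (List Int)) (lock : List (List Int)) : Prop :=
  key ≠ [] ∧ (∀ row ∈ key, row.length = key.length) ∧ (∀ row ∈ lock, row.length = lock.length)
instance (key : List (List Int)) (lock : List (List Int)) : Decidable (Pre_solution key lock) := by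
  unfold Pre_solution; infer_instance

def pvWitness_solution : List (List Int) × List (List Int) := ([[1]], [[0]])

def Spec_solution (key : List (List Int)) (lock : List (List Int)) (out : Bool) : Prop := out = solution_alt key lock
instance (key : List (List Int)) (lock : List (List Int)) (out : Bool) : Decidable (Spec_solution key lock out) := by unfold Spec_solution; infer_instance

-- ===== CLAIM (what is proved, stated in full; the proofs are below) =====
def Claim_equal_solution : Prop := ∀ (key : List (List Int)) (lock : List (List Int)), Dom_solution key lock → Pre_solution key lock → Spec_solution key lock (solution key lock)

-- ===== LEMMAS AND PROOFS =====

-- K is an n×n matrix whose (a,b) entry (read with getD) is f a b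
def PVRep (K : List (List Int)) (n : Nat) (f : Nat → Nat → Int) : Prop :=
  K.length = n ∧ (∀ row ∈ K, row.length = n) ∧
    ∀ a b, a < n → b < n → (K.getD a []).getD b 0 = f a b

theorem getD_map_range' {α : Type} (f : Nat → α) (n a : Nat) (d : α) (ha : a < n) :
    ((List.range n).map f).getD a d = f a := by
  simp [List.getD_eq_getElem?_getD, ha]

theorem rot90_eq {K : List (List Int)} {n : Nat} {f : Nat → Nat → Int} (h : PVRep K n f) :
    rot90 K = (List.range n).map (fun a : Nat =>
      (List.range n).map (fun b : Nat => pvGetI (pvGet K ((b : Nat) : Int)) ((n : Int) - 1 - ((a : Nat) : Int)))) := by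
  obtain ⟨h1, h2, -⟩ := h
  rcases K with _ | ⟨r, K'⟩
  · simp at h1; subst h1; rfl
  · have hrow0 : (pvGet (r :: K') 0).length = n := by
      have hr : pvGet (r :: K') 0 = r := by simp [pvGet]
      rw [hr]; exact h2 r (by simp)
    unfold rot90
    rw [hrow0, h1, PySem.List.pyRange_neg_one, PySem.List.pyRange_zero_nat]
    have hn : ((n : Int) - 1 - (-1)).toNat = n := by omega
    rw [hn]
    simp only [List.map_map]
    apply List.map_congr_left
    intro a _
    simp [Function.comp]

theorem rot90_pvrep {K : List (List Int)} {n : Nat} {f : Nat → Nat → Int}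
    (h : PVRep K n f) : PVRep (rot90 K) n (fun a b => f b (n - 1 - a)) := by
  rw [rot90_eq h]
  refine ⟨by simp, by intro row hrow; simp at hrow; obtain ⟨a, -, rfl⟩ := hrow; simp, ?_⟩
  intro a b ha hb
  rw [getD_map_range' _ n a [] ha, getD_map_range' _ n b 0 hb]
  have hcast : ((n : Int) - 1 - (a : Int)) = ((n - 1 - a : Nat) : Int) := by omega
  rw [pvGetI, pvGet, PySem.List.pyGetD_natCast, hcast, PySem.List.pyGetD_natCast]
  exact h.2.2 b (n - 1 - a) hb (by omega)

def Shape2 (b : List (List Int)) (m : Nat) : Prop := b.length = m ∧ ∀ row ∈ b, row.length = m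

def get2 (b : List (List Int)) (u v : Nat) : Int := (b.getD u []).getD v 0

def stepA (rk : List (List Int)) (m : Nat) (x y : Int) (tl : List (List Int)) (i j : Int) : List (List Int) :=
  if 0 ≤ i + x ∧ i + x < (m : Int) ∧ 0 ≤ j + y ∧ j + y < (m : Int) then
    PySem.List.pySetD tl (i + x)
      (PySem.List.pySetD (pvGet tl (i + x)) (j + y)
        (pvGetI (pvGet tl (i + x)) (j + y) + pvGetI (pvGet rk i) j))
  else tl

theorem getD_mem {α : Type} (l : List α) (u : Nat) (d : α) (hu : u < l.length) : l.getD u d ∈ l := by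
  rw [List.getD_eq_getElem?_getD, List.getElem?_eq_getElem hu]
  exact List.getElem_mem hu

theorem stepA_shape {rk : List (List Int)} {m : Nat} {x y : Int} {b : List (List Int)} {i j : Int}
    (hb : Shape2 b m) : Shape2 (stepA rk m x y b i j) m := by
  unfold stepA
  split
  · rename_i hg
    obtain ⟨hg1, hg2, hg3, hg4⟩ := hg
    have hlen : (i + x).toNat < b.length := by rw [hb.1]; omega
    constructor
    · rw [PySem.List.length_pySetD]; exact hb.1
    · intro row hrow
      rw [PySem.List.pySetD_of_nonneg _ _ hg1] at hrow
      rcases List.mem_or_eq_of_mem_set hrow with h | rfl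
      · exact hb.2 _ h
      · rw [PySem.List.length_pySetD, pvGet, PySem.List.pyGetD_of_nonneg _ _ hg1]
        exact hb.2 _ (getD_mem b _ [] hlen)
  · exact hb

theorem stepA_get2 {rk : List (List Int)} {m : Nat} {x y : Int} {b : List (List Int)} {i j : Int}
    {u v : Nat} (hb : Shape2 b m) (hu : u < m) (hv : v < m) :
    get2 (stepA rk m x y b i j) u v =
      if (u : Int) = i + x ∧ (v : Int) = j + y then get2 b u v + pvGetI (pvGet rk i) j
      else get2 b u v := by
  unfold stepA
  split
  · rename_i hg
    obtain ⟨hg1, hg2, hg3, hg4⟩ := hg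
    have hlen : (i + x).toNat < b.length := by rw [hb.1]; omega
    rw [PySem.List.pySetD_of_nonneg _ _ hg1, pvGet, PySem.List.pyGetD_of_nonneg b _ hg1,
        PySem.List.pySetD_of_nonneg _ _ hg3]
    have hrlen : (b.getD (i + x).toNat []).length = m := hb.2 _ (getD_mem b _ [] hlen)
    unfold get2
    rw [List.getD_eq_getElem?_getD (l := b.set _ _), List.getElem?_set]
    by_cases hui : (i + x).toNat = u
    · rw [if_pos hui, if_pos (hui ▸ hlen), Option.getD_some]
      rw [List.getD_eq_getElem?_getD (l := (b.getD (i+x).toNat []).set _ _), List.getElem?_set]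
      by_cases hvj : (j + y).toNat = v
      · rw [if_pos hvj, if_pos (by rw [hrlen]; omega), Option.getD_some,
            if_pos ⟨by omega, by omega⟩]
        rw [pvGetI, PySem.List.pyGetD_of_nonneg _ _ hg3, hui, hvj]
      · rw [if_neg hvj, if_neg (fun ⟨h1, h2⟩ => hvj (by omega)),
            ← List.getD_eq_getElem?_getD, hui]
    · rw [if_neg hui, if_neg (fun ⟨h1, h2⟩ => hui (by omega)),
          ← List.getD_eq_getElem?_getD]
  · rename_i hg
    rw [if_neg (fun ⟨h1, h2⟩ => hg ⟨by omega, by omega, by omega, by omega⟩)]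

theorem innerA_spec (rk : List (List Int)) (m : Nat) (x y i : Int) :
    ∀ (js : List Nat) (b : List (List Int)), js.Nodup → Shape2 b m →
      Shape2 (js.foldl (fun tl (j : Nat) => stepA rk m x y tl i (j : Int)) b) m ∧
      ∀ u v, u < m → v < m →
        get2 (js.foldl (fun tl (j : Nat) => stepA rk m x y tl i (j : Int)) b) u v =
          get2 b u v + (if (u : Int) = i + x ∧ ∃ j ∈ js, (v : Int) = (j : Int) + y
                        then pvGetI (pvGet rk i) ((v : Int) - y) else 0) := by
  intro js
  induction js with
  | nil => intro b _ hb; exact ⟨hb, by intro u v _ _; simp⟩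
  | cons j js ih =>
    intro b hnd hb
    simp only [List.foldl_cons]
    obtain ⟨ih1, ih2⟩ := ih (stepA rk m x y b i (j : Int)) hnd.of_cons (stepA_shape hb)
    refine ⟨ih1, ?_⟩
    intro u v hu hv
    rw [ih2 u v hu hv, stepA_get2 hb hu hv]
    by_cases hui : (u : Int) = i + x
    · by_cases hvj : (v : Int) = (j : Int) + y
      · rw [if_pos ⟨hui, hvj⟩]
        rw [if_neg, if_pos ⟨hui, ⟨j, by simp, hvj⟩⟩]
        · have : (v : Int) - y = (j : Int) := by omega
          rw [this]; ring
        · rintro ⟨-, j', hj', hvj'⟩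
          have : j' = j := by omega
          exact (List.nodup_cons.mp hnd).1 (this ▸ hj')
      · by_cases hex : ∃ j' ∈ js, (v : Int) = (j' : Int) + y
        · rw [if_neg (fun h => hvj h.2), if_pos ⟨hui, hex⟩, if_pos]
          obtain ⟨j', hj', hv'⟩ := hex
          exact ⟨hui, j', List.mem_cons_of_mem _ hj', hv'⟩
        · rw [if_neg (fun h => hvj h.2), if_neg (fun h => hex h.2), if_neg]
          rintro ⟨-, j', hj', hvj'⟩
          rcases List.mem_cons.mp hj' with rfl | hmem
          · exact hvj hvj'
          · exact hex ⟨j', hmem, hvj'⟩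
    · rw [if_neg (fun h => hui h.1), if_neg (fun h => hui h.1), if_neg (fun h => hui h.1)]

theorem outerA_spec (rk : List (List Int)) (m n : Nat) (x y : Int) :
    ∀ (is : List Nat) (b : List (List Int)), is.Nodup → Shape2 b m →
      Shape2 (is.foldl (fun tl (i : Nat) =>
        (List.range n).foldl (fun tl' (j : Nat) => stepA rk m x y tl' (i : Int) (j : Int)) tl) b) m ∧
      ∀ u v, u < m → v < m →
        get2 (is.foldl (fun tl (i : Nat) =>
          (List.range n).foldl (fun tl' (j : Nat) => stepA rk m x y tl' (i : Int) (j : Int)) tl) b) u v =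
          get2 b u v + (if (∃ i ∈ is, (u : Int) = (i : Int) + x) ∧ 0 ≤ (v : Int) - y ∧ (v : Int) - y < (n : Int)
                        then pvGetI (pvGet rk ((u : Int) - x)) ((v : Int) - y) else 0) := by
  intro is
  induction is with
  | nil => intro b _ hb; exact ⟨hb, by intro u v _ _; simp⟩
  | cons i is ih =>
    intro b hnd hb
    simp only [List.foldl_cons]
    obtain ⟨hin1, hin2⟩ := innerA_spec rk m x y (i : Int) (List.range n) b (List.nodup_range) hb
    obtain ⟨ih1, ih2⟩ := ih _ hnd.of_cons hin1
    refine ⟨ih1, ?_⟩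
    intro u v hu hv
    rw [ih2 u v hu hv, hin2 u v hu hv]
    have hexv : (∃ j ∈ List.range n, (v : Int) = (j : Int) + y) ↔ (0 ≤ (v : Int) - y ∧ (v : Int) - y < (n : Int)) := by
      constructor
      · rintro ⟨j, hj, hvj⟩
        rw [List.mem_range] at hj
        constructor <;> omega
      · rintro ⟨h1, h2⟩
        exact ⟨((v : Int) - y).toNat, List.mem_range.mpr (by omega), by omega⟩
    by_cases hui : (u : Int) = (i : Int) + x
    · have hne : ¬ ∃ i' ∈ is, (u : Int) = (i' : Int) + x := by
        rintro ⟨i', hi', hui'⟩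
        have : i' = i := by omega
        exact (List.nodup_cons.mp hnd).1 (this ▸ hi')
      have h1 : ¬ ((∃ i' ∈ is, (u : Int) = (i' : Int) + x) ∧ 0 ≤ (v : Int) - y ∧ (v : Int) - y < (n : Int)) :=
        fun h => hne h.1
      rw [if_neg h1]
      by_cases hcv : 0 ≤ (v : Int) - y ∧ (v : Int) - y < (n : Int)
      · have h2 : (u : Int) = (i : Int) + x ∧ ∃ j ∈ List.range n, (v : Int) = (j : Int) + y :=
          ⟨hui, hexv.mpr hcv⟩
        have h3 : (∃ i' ∈ i :: is, (u : Int) = (i' : Int) + x) ∧ 0 ≤ (v : Int) - y ∧ (v : Int) - y < (n : Int) :=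
          ⟨⟨i, List.mem_cons_self, hui⟩, hcv⟩
        rw [if_pos h2, if_pos h3]
        have : (u : Int) - x = (i : Int) := by omega
        rw [this]; ring
      · have h2 : ¬ ((u : Int) = (i : Int) + x ∧ ∃ j ∈ List.range n, (v : Int) = (j : Int) + y) :=
          fun h => hcv (hexv.mp h.2)
        have h3 : ¬ ((∃ i' ∈ i :: is, (u : Int) = (i' : Int) + x) ∧ 0 ≤ (v : Int) - y ∧ (v : Int) - y < (n : Int)) :=
          fun h => hcv h.2
        rw [if_neg h2, if_neg h3]
        ring
    · have h2 : ¬ ((u : Int) = (i : Int) + x ∧ ∃ j ∈ List.range n, (v : Int) = (j : Int) + y) :=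
        fun h => hui h.1
      have h4 : (∃ i' ∈ i :: is, (u : Int) = (i' : Int) + x) ↔ (∃ i' ∈ is, (u : Int) = (i' : Int) + x) := by
        constructor
        · rintro ⟨i', hi', hui'⟩
          rcases List.mem_cons.mp hi' with rfl | hmem
          · exact absurd hui' hui
          · exact ⟨i', hmem, hui'⟩
        · rintro ⟨i', hi', hui'⟩
          exact ⟨i', List.mem_cons_of_mem _ hi', hui'⟩
      rw [if_neg h2]
      simp only [h4]
      ring

theorem all_congr_mem {α : Type} {l : List α} {f g : α → Bool} (h : ∀ x ∈ l, f x = g x) :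
    l.all f = l.all g := by
  induction l with
  | nil => rfl
  | cons a l ih =>
    simp only [List.all_cons, h a (List.mem_cons_self), ih (fun x hx => h x (List.mem_cons_of_mem _ hx))]

theorem mem_row_iff (row : List Int) (m : Nat) (hlen : row.length = m) (c : Int) :
    c ∈ row ↔ ∃ v, v < m ∧ row.getD v 0 = c := by
  rw [List.mem_iff_getElem]
  constructor
  · rintro ⟨v, hv, rfl⟩
    exact ⟨v, by omega, by rw [List.getD_eq_getElem?_getD, List.getElem?_eq_getElem hv]; rfl⟩
  · rintro ⟨v, hv, rfl⟩
    have hv' : v < row.length := by omega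
    exact ⟨v, hv', by rw [List.getD_eq_getElem?_getD, List.getElem?_eq_getElem hv']; rfl⟩

theorem all_scan (b : List (List Int)) (m : Nat) (hb : Shape2 b m) :
    (b.all fun row => !(row.contains 0) && !(row.contains 2)) =
    ((List.range m).all fun u => (List.range m).all fun v =>
      !(get2 b u v == 0) && !(get2 b u v == 2)) := by
  rw [Bool.eq_iff_iff]
  simp only [List.all_eq_true, Bool.and_eq_true, Bool.not_eq_true', List.contains_eq_mem,
    decide_eq_false_iff_not, List.mem_range, beq_eq_false_iff_ne]
  constructor
  · intro h u hu v hv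
    have hrow := getD_mem b u [] (by rw [hb.1]; exact hu)
    have := h _ hrow
    have hlen := hb.2 _ hrow
    rw [mem_row_iff _ m hlen 0, mem_row_iff _ m hlen 2] at this
    exact ⟨fun h0 => this.1 ⟨v, hv, h0⟩, fun h2 => this.2 ⟨v, hv, h2⟩⟩
  · intro h row hrow
    obtain ⟨u, hu, rfl⟩ := List.mem_iff_getElem.mp hrow
    have hu' : u < m := by rw [← hb.1]; exact hu
    have hgd : b.getD u [] = b[u] := by
      rw [List.getD_eq_getElem?_getD, List.getElem?_eq_getElem hu]; rfl
    have hlen : (b[u] : List Int).length = m := hb.2 _ hrow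
    rw [mem_row_iff _ m hlen 0, mem_row_iff _ m hlen 2]
    constructor
    · rintro ⟨v, hv, h0⟩
      exact (h u hu' v hv).1 (by rw [get2, hgd]; exact h0)
    · rintro ⟨v, hv, h2⟩
      exact (h u hu' v hv).2 (by rw [get2, hgd]; exact h2)

-- proof-side board-centric predicate: value of cell (u,v) after the overlay avoids 0 and 2
def cellOK (key lock : List (List Int)) (n r : Nat) (x y : Int) (u v : Nat) : Bool :=
  let val := if 0 ≤ (u : Int) - x ∧ (u : Int) - x < (n : Int) ∧
                0 ≤ (v : Int) - y ∧ (v : Int) - y < (n : Int)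
             then get2 lock u v + kval key n r ((u : Int) - x).toNat ((v : Int) - y).toNat
             else get2 lock u v
  !(val == 0) && !(val == 2)

def boardOK (key lock : List (List Int)) (n m r : Nat) (x y : Int) : Bool :=
  (List.range m).all fun u => (List.range m).all fun v => cellOK key lock n r x y u v

theorem checkShift_eq_board (key lock rk : List (List Int)) (n m : Nat) (r : Nat) (x y : Int)
    (hrk : PVRep rk n (kval key n r))
    (hm : lock.length = m) (hrows : ∀ row ∈ lock, row.length = m) :
    checkShift lock rk (n : Int) (m : Int) x y = boardOK key lock n m r x y := by
  unfold checkShift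
  have htemp : ((PySem.List.pyRange 0 (n : Int) 1).foldl (fun tl i =>
      (PySem.List.pyRange 0 (n : Int) 1).foldl (fun tl j =>
        if 0 ≤ i + x ∧ i + x < (m : Int) ∧ 0 ≤ j + y ∧ j + y < (m : Int) then
          PySem.List.pySetD tl (i + x)
            (PySem.List.pySetD (pvGet tl (i + x)) (j + y)
              (pvGetI (pvGet tl (i + x)) (j + y) + pvGetI (pvGet rk i) j))
        else tl) tl) lock) =
      (List.range n).foldl (fun tl (i : Nat) =>
        (List.range n).foldl (fun tl' (j : Nat) => stepA rk m x y tl' (i : Int) (j : Int)) tl) lock := by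
    simp only [PySem.List.pyRange_zero_nat, List.foldl_map]
    rfl
  rw [htemp]
  obtain ⟨hsh, hcell⟩ := outerA_spec rk m n x y (List.range n) lock List.nodup_range ⟨hm, hrows⟩
  rw [all_scan _ m hsh]
  unfold boardOK
  apply all_congr_mem
  intro u hu
  rw [List.mem_range] at hu
  apply all_congr_mem
  intro v hv
  rw [List.mem_range] at hv
  rw [hcell u v hu hv]
  have hexu : (∃ i ∈ List.range n, (u : Int) = (i : Int) + x) ↔ (0 ≤ (u : Int) - x ∧ (u : Int) - x < (n : Int)) := by
    constructor
    · rintro ⟨i, hi, hui⟩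
      rw [List.mem_range] at hi
      constructor <;> omega
    · rintro ⟨h1, h2⟩
      exact ⟨((u : Int) - x).toNat, List.mem_range.mpr (by omega), by omega⟩
  unfold cellOK
  by_cases hc : 0 ≤ (u : Int) - x ∧ (u : Int) - x < (n : Int) ∧ 0 ≤ (v : Int) - y ∧ (v : Int) - y < (n : Int)
  · obtain ⟨h1, h2, h3, h4⟩ := hc
    rw [if_pos ⟨hexu.mpr ⟨h1, h2⟩, h3, h4⟩]
    have hval : pvGetI (pvGet rk ((u : Int) - x)) ((v : Int) - y) =
        kval key n r ((u : Int) - x).toNat ((v : Int) - y).toNat := by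
      rw [pvGetI, pvGet, PySem.List.pyGetD_of_nonneg _ _ h1, PySem.List.pyGetD_of_nonneg _ _ h3]
      exact hrk.2.2 _ _ (by omega) (by omega)
    rw [hval, if_pos (show 0 ≤ (u : Int) - x ∧ (u : Int) - x < (n : Int) ∧
      0 ≤ (v : Int) - y ∧ (v : Int) - y < (n : Int) from ⟨h1, h2, h3, h4⟩)]
  · have hc1 : ¬ ((∃ i ∈ List.range n, (u : Int) = (i : Int) + x) ∧ 0 ≤ (v : Int) - y ∧ (v : Int) - y < (n : Int)) := by
      rintro ⟨he, h3, h4⟩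
      obtain ⟨h1, h2⟩ := hexu.mp he
      exact hc ⟨h1, h2, h3, h4⟩
    rw [if_neg hc1, add_zero, if_neg hc]

theorem mem_badCells (lock : List (List Int)) (m : Nat) (u v : Nat) :
    (u, v) ∈ badCells lock m ↔ u < m ∧ v < m ∧ (get2 lock u v = 0 ∨ get2 lock u v = 2) := by
  simp only [badCells, get2, List.mem_flatMap, List.mem_filterMap, List.mem_range]
  constructor
  · rintro ⟨u', hu', v', hv', hif⟩
    by_cases hval : (lock.getD u' []).getD v' 0 = 0 ∨ (lock.getD u' []).getD v' 0 = 2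
    · rw [if_pos hval] at hif
      obtain ⟨rfl, rfl⟩ := Prod.mk.inj (Option.some.inj hif)
      exact ⟨hu', hv', hval⟩
    · rw [if_neg hval] at hif
      exact absurd hif (by simp)
  · rintro ⟨hu, hv, hval⟩
    exact ⟨u, hu, v, hv, by rw [if_pos hval]⟩

theorem okShift_eq_board (key lock : List (List Int)) (n m r : Nat) (x y : Int) :
    okShift key lock n m (badCells lock m) r x y = boardOK key lock n m r x y := by
  rw [Bool.eq_iff_iff]
  unfold okShift boardOK
  simp only [Bool.and_eq_true, List.all_eq_true, decide_eq_true_eq, List.mem_range]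
  constructor
  · rintro ⟨hbad, hwin⟩ u hu v hv
    unfold cellOK
    by_cases hov : 0 ≤ (u : Int) - x ∧ (u : Int) - x < (n : Int) ∧
        0 ≤ (v : Int) - y ∧ (v : Int) - y < (n : Int)
    · obtain ⟨h1, h2, h3, h4⟩ := hov
      have hi : ((u : Int) - x).toNat < n := by omega
      have hji : ((v : Int) - y).toNat < n := by omega
      have hrow := hwin ((u : Int) - x).toNat hi
      rw [if_pos (show 0 ≤ ((((u : Int) - x).toNat : Int) + x) ∧
            ((((u : Int) - x).toNat : Int) + x) < (m : Int) by constructor <;> omega)] at hrow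
      have hcell := List.all_eq_true.mp hrow _ (List.mem_range.mpr hji)
      simp only [Bool.not_eq_true', decide_eq_false_iff_not] at hcell
      have hu' : ((((u : Int) - x).toNat : Int) + x).toNat = u := by omega
      have hv' : ((((v : Int) - y).toNat : Int) + y).toNat = v := by omega
      rw [hu', hv'] at hcell
      rw [if_pos ⟨h1, h2, h3, h4⟩]
      simp only [Bool.and_eq_true, Bool.not_eq_true', beq_eq_false_iff_ne]
      constructor
      · intro h0
        exact hcell ⟨by omega, by omega, Or.inl h0⟩
      · intro h2'
        exact hcell ⟨by omega, by omega, Or.inr h2'⟩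
    · rw [if_neg hov]
      simp only [Bool.and_eq_true, Bool.not_eq_true', beq_eq_false_iff_ne]
      constructor <;> intro hbadval
      all_goals {
        have hmem : (u, v) ∈ badCells lock m := (mem_badCells lock m u v).mpr
          ⟨hu, hv, by first | exact Or.inl hbadval | exact Or.inr hbadval⟩
        obtain ⟨b1, b2, b3, b4⟩ := hbad (u, v) hmem
        exact hov ⟨by omega, by omega, by omega, by omega⟩ }
  · intro hboard
    constructor
    · rintro ⟨u, v⟩ hmem
      obtain ⟨hu, hv, hval⟩ := (mem_badCells lock m u v).mp hmem
      have hck := hboard u hu v hv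
      unfold cellOK at hck
      simp only [Bool.and_eq_true, Bool.not_eq_true', beq_eq_false_iff_ne] at hck
      by_contra hno
      rw [if_neg (by
        intro h
        exact hno ⟨by omega, by omega, by omega, by omega⟩)] at hck
      rcases hval with h | h
      · exact hck.1 h
      · exact hck.2 h
    · intro i hi
      split
      · rename_i hwu
        rw [List.all_eq_true]
        intro j hj
        rw [List.mem_range] at hj
        simp only [Bool.not_eq_true', decide_eq_false_iff_not]
        rintro ⟨hv1, hv2, hval⟩
        have hu : ((i : Int) + x).toNat < m := by omega
        have hv : ((j : Int) + y).toNat < m := by omega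
        have hck := hboard _ hu _ hv
        unfold cellOK at hck
        have hov : 0 ≤ ((((i : Int) + x).toNat : Int)) - x ∧ ((((i : Int) + x).toNat : Int)) - x < (n : Int) ∧
            0 ≤ ((((j : Int) + y).toNat : Int)) - y ∧ ((((j : Int) + y).toNat : Int)) - y < (n : Int) := by
          refine ⟨by omega, by omega, by omega, by omega⟩
        rw [if_pos hov] at hck
        have hi' : (((((i : Int) + x).toNat : Int)) - x).toNat = i := by omega
        have hj' : (((((j : Int) + y).toNat : Int)) - y).toNat = j := by omega
        rw [hi', hj'] at hck
        simp only [Bool.and_eq_true, Bool.not_eq_true', beq_eq_false_iff_ne] at hck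
        unfold get2 at hck
        rcases hval with h | h
        · exact hck.1 h
        · exact hck.2 h
      · rfl

theorem pvrep_congr {K : List (List Int)} {n : Nat} {f g : Nat → Nat → Int}
    (h : PVRep K n f) (hfg : ∀ a b, a < n → b < n → f a b = g a b) : PVRep K n g :=
  ⟨h.1, h.2.1, fun a b ha hb => (h.2.2 a b ha hb).trans (hfg a b ha hb)⟩

theorem any_congr_mem {α : Type} {l : List α} {f g : α → Bool} (h : ∀ x ∈ l, f x = g x) :
    l.any f = l.any g := by
  induction l with
  | nil => rfl
  | cons a l ih =>
    simp only [List.any_cons, h a (List.mem_cons_self), ih (fun x hx => h x (List.mem_cons_of_mem _ hx))]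

theorem or4_rot (a b c d : Bool) :
    (b || (c || (d || (a || false)))) = (a || (b || (c || (d || false)))) := by
  cases a <;> cases b <;> cases c <;> cases d <;> rfl

-- a successful shift must anchor the window on any bad cell: the pruned ranges lose nothing
theorem board_shift_anchored (key lock : List (List Int)) (n m r : Nat) (x y : Int)
    (u0 v0 : Nat) (hu0 : u0 < m) (hv0 : v0 < m)
    (hbad : get2 lock u0 v0 = 0 ∨ get2 lock u0 v0 = 2)
    (hok : boardOK key lock n m r x y = true) :
    (u0 : Int) - n + 1 ≤ x ∧ x ≤ (u0 : Int) ∧ (v0 : Int) - n + 1 ≤ y ∧ y ≤ (v0 : Int) := by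
  have := (List.all_eq_true.mp (List.all_eq_true.mp hok u0 (List.mem_range.mpr hu0)) v0
    (List.mem_range.mpr hv0))
  unfold cellOK at this
  simp only [Bool.and_eq_true, Bool.not_eq_true', beq_eq_false_iff_ne] at this
  by_contra hno
  rw [if_neg (by intro h; exact hno ⟨by omega, by omega, by omega, by omega⟩)] at this
  rcases hbad with h | h
  · exact this.1 h
  · exact this.2 h

-- ===== VERDICT (by name: the statement is the Claim_ definition above) =====
theorem solution_spec : Claim_equal_solution := by
  unfold Claim_equal_solution Spec_solution
  intro key lock _ hpre
  obtain ⟨hne, hkrows, hlrows⟩ := hpre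
  have h0 : PVRep key key.length (kval key key.length 0) :=
    ⟨rfl, hkrows, fun a b _ _ => rfl⟩
  have hk1 : PVRep (rot90 key) key.length (kval key key.length 1) :=
    pvrep_congr (rot90_pvrep h0) (by intro a b ha hb; simp [kval])
  have hk2 : PVRep (rot90 (rot90 key)) key.length (kval key key.length 2) :=
    pvrep_congr (rot90_pvrep hk1) (by intro a b ha hb; simp [kval])
  have hk3 : PVRep (rot90 (rot90 (rot90 key))) key.length (kval key key.length 3) :=
    pvrep_congr (rot90_pvrep hk2) (by
      intro a b ha hb
      simp only [kval]
      norm_num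
      rw [show key.length - 1 - (key.length - 1 - a) = a from by omega])
  have hk0 : PVRep (rot90 (rot90 (rot90 (rot90 key)))) key.length (kval key key.length 0) :=
    pvrep_congr (rot90_pvrep hk3) (by
      intro a b ha hb
      simp only [kval]
      norm_num
      rw [show key.length - 1 - (key.length - 1 - a) = a from by omega])
  have hnpos : 0 < key.length := by
    cases key
    · exact absurd rfl hne
    · simp
  -- per rotation: A's any over the full shift range equals B's any over B's ranges
  have hxy : ∀ (rk : List (List Int)) (r : Nat), PVRep rk key.length (kval key key.length r) →
      ((PySem.List.pyRange (-((key.length : Int) - 1)) (lock.length : Int) 1).any fun x =>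
        (PySem.List.pyRange (-((key.length : Int) - 1)) (lock.length : Int) 1).any fun y =>
          checkShift lock rk (key.length : Int) (lock.length : Int) x y) =
      (match badCells lock lock.length with
        | (u0, v0) :: _ =>
            (PySem.List.pyRange ((u0 : Int) - key.length + 1) ((u0 : Int) + 1) 1,
             PySem.List.pyRange ((v0 : Int) - key.length + 1) ((v0 : Int) + 1) 1)
        | [] =>
            (PySem.List.pyRange (-((key.length : Int) - 1)) (lock.length : Int) 1,
             PySem.List.pyRange (-((key.length : Int) - 1)) (lock.length : Int) 1) : List Int × List Int).1.any (fun x =>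
        (match badCells lock lock.length with
        | (u0, v0) :: _ =>
            (PySem.List.pyRange ((u0 : Int) - key.length + 1) ((u0 : Int) + 1) 1,
             PySem.List.pyRange ((v0 : Int) - key.length + 1) ((v0 : Int) + 1) 1)
        | [] =>
            (PySem.List.pyRange (-((key.length : Int) - 1)) (lock.length : Int) 1,
             PySem.List.pyRange (-((key.length : Int) - 1)) (lock.length : Int) 1) : List Int × List Int).2.any (fun y =>
          okShift key lock key.length lock.length (badCells lock lock.length) r x y)) := by
    intro rk r hrk
    have hA : ∀ x y : Int, checkShift lock rk (key.length : Int) (lock.length : Int) x y =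
        boardOK key lock key.length lock.length r x y :=
      fun x y => checkShift_eq_board key lock rk key.length lock.length r x y hrk rfl hlrows
    have hB : ∀ x y : Int, okShift key lock key.length lock.length (badCells lock lock.length) r x y =
        boardOK key lock key.length lock.length r x y :=
      fun x y => okShift_eq_board key lock key.length lock.length r x y
    rcases hcase : badCells lock lock.length with - | ⟨⟨u0, v0⟩, rest⟩
    · simp only
      rw [← hcase]
      apply any_congr_mem; intro x _
      apply any_congr_mem; intro y _
      rw [hA, hB]
    · simp only
      obtain ⟨hu0, hv0, hbadval⟩ := (mem_badCells lock lock.length u0 v0).mp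
        (hcase ▸ List.mem_cons_self)
      rw [Bool.eq_iff_iff]
      simp only [List.any_eq_true, PySem.List.mem_pyRange_one]
      constructor
      · rintro ⟨x, hx, y, hy, hck⟩
        rw [hA] at hck
        obtain ⟨a1, a2, a3, a4⟩ := board_shift_anchored key lock key.length lock.length r x y
          u0 v0 hu0 hv0 hbadval hck
        refine ⟨x, ⟨by omega, by omega⟩, y, ⟨by omega, by omega⟩, ?_⟩
        rw [← hcase, hB, hck]
      · rintro ⟨x, hx, y, hy, hok⟩
        rw [← hcase] at hok
        rw [hB] at hok
        refine ⟨x, ⟨by omega, by omega⟩, y, ⟨by omega, by omega⟩, ?_⟩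
        rw [hA, hok]
  show solution key lock = solution_alt key lock
  unfold solution solution_alt rotAll
  simp only [List.any_cons, List.any_nil]
  rw [hxy _ 1 hk1, hxy _ 2 hk2, hxy _ 3 hk3, hxy _ 0 hk0]
  rw [show List.range 4 = [0, 1, 2, 3] from rfl]
  simp only [List.any_cons, List.any_nil]
  exact or4_rot _ _ _ _
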